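-- pv_equiv track=rewrite | github.com/woodrutr/GraniteLedger | config/policy_loader.py | _coerce_year_list
-- ===== SOURCE A (Python) =====
-- from collections.abc import Iterable, Mapping
-- from typing import Any, cast
--
-- def _coerce_year_list(years: Any) -> list[int]:
--     """Convert an iterable of years into a sorted list of unique integers."""
--
--     if years is None:
--         return []
--     if isinstance(years, Mapping):  # ambiguous structure
--         raise TypeError("years must be provided as an iterable of integers, not a mapping")
--     if isinstance(years, (str, bytes)):
--         raise TypeError("years must be provided as an iterable of integers")
--
--     if not isinstance(years, Iterable):
--         raise TypeError("years must be provided as an iterable of integers")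
--
--     normalized: list[int] = []
--     seen: set[int] = set()
--     for value in years:
--         try:
--             year = int(value)
--         except (TypeError, ValueError) as exc:
--             raise TypeError(f"Invalid year value {value!r}; years must be integers") from exc
--         if year not in seen:
--             normalized.append(year)
--             seen.add(year)
--     normalized.sort()
--     return normalized
-- ===== SOURCE B (Python) =====
-- from collections.abc import Iterable, Mapping
-- from typing import Any
--
--
-- def _coerce_year_list(years: Any) -> list[int]:
--     """Convert an iterable of years into a sorted list of unique integers."""
--
--     if years is None:
--         return []
--     if isinstance(years, Mapping):  # ambiguous structure
--         raise TypeError("years must be provided as an iterable of integers, not a mapping")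
--     if isinstance(years, (str, bytes)):
--         raise TypeError("years must be provided as an iterable of integers")
--
--     if not isinstance(years, Iterable):
--         raise TypeError("years must be provided as an iterable of integers")
--
--     values: list[int] = []
--     for value in years:
--         try:
--             values.append(int(value))
--         except (TypeError, ValueError) as exc:
--             raise TypeError(f"Invalid year value {value!r}; years must be integers") from exc
--     values.sort()
--     out: list[int] = []
--     for v in values:
--         if not out or v != out[-1]:
--             out.append(v)
--     return out
-- ===== Notes on version B (the rewrite author's own statement) =====
-- stated objective: alternative
-- what changed: Replaced the hash-set membership dedup (seen-set + append during the loop, then sort) by collecting all converted ints, sorting once, and removing consecutive duplicates in a single adjacent-compare pass.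
import Mathlib
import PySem

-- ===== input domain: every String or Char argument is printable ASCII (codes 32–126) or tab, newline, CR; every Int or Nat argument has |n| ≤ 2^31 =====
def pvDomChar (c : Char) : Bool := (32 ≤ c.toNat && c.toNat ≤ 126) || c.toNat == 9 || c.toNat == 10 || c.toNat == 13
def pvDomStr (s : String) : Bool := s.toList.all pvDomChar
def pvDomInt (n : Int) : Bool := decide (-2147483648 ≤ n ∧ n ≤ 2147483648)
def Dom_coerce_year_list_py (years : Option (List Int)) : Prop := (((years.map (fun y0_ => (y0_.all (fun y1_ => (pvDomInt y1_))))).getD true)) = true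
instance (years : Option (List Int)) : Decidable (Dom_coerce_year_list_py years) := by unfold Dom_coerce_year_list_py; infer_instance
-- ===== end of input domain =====

-- B replaces A's seen-set dedup-then-sort by sort-then-adjacent-dedup (alternative decomposition, same cost).
-- On the ported domain Option (List Int) every element is already an int, so int(value) never raises and the
-- TypeError guard branches of both Pythons are unreachable; both functions are total here.

-- ===== PORT A =====
def coerce_year_list_py (years : Option (List Int)) : List Int :=
  match years with
  | none => []
  | some ys =>
      -- normalized, seen accumulated together; 'if year not in seen: append; add'
      let r := ys.foldl
        (fun (p : List Int × PySem.Set Int) value =>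
          if ¬ PySem.Set.contains p.2 value then (p.1 ++ [value], PySem.Set.add p.2 value) else p)
        ([], PySem.Set.empty)
      PySem.List.sorted r.1 (fun x => x) false

-- ===== PORT B =====
def coerce_year_list_py_alt (years : Option (List Int)) : List Int :=
  match years with
  | none => []
  | some ys =>
      let values := PySem.List.sorted ys (fun x => x) false
      -- 'if not out or v != out[-1]: out.append(v)'
      values.foldl (fun out v => if out = [] ∨ out.getLast? ≠ some v then out ++ [v] else out) []

-- ===== PRECONDITION & SPEC =====
def Spec_coerce_year_list_py (years : Option (List Int)) (out : List Int) : Prop := out = coerce_year_list_py_alt years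
instance (years : Option (List Int)) (out : List Int) : Decidable (Spec_coerce_year_list_py years out) := by unfold Spec_coerce_year_list_py; infer_instance

-- ===== CLAIM (what is proved, stated in full; the proofs are below) =====
def Claim_equal_coerce_year_list_py : Prop := ∀ (years : Option (List Int)), Dom_coerce_year_list_py years → Spec_coerce_year_list_py years (coerce_year_list_py years)

-- ===== LEMMAS AND PROOFS =====

def pvGo : Option Int → List Int → List Int
  | _, [] => []
  | p, v :: l => if p = some v then pvGo p l else v :: pvGo (some v) l

theorem pvGo_nil (p : Option Int) : pvGo p [] = [] := by cases p <;> rfl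

theorem pvGo_cons_eq (p : Option Int) (v : Int) (l : List Int) (h : p = some v) :
    pvGo p (v :: l) = pvGo p l := by simp [pvGo, h]

theorem pvGo_cons_ne (p : Option Int) (v : Int) (l : List Int) (h : p ≠ some v) :
    pvGo p (v :: l) = v :: pvGo (some v) l := by simp [pvGo, h]

-- A's loop keeps normalized and seen identical (both append exactly the unseen values, in order),
-- so the pair fold is the Set.ofList fold on both components.
theorem pvA_fold_pair (ys : List Int) (s : List Int) :
    ys.foldl
      (fun (p : List Int × PySem.Set Int) value =>
        if ¬ PySem.Set.contains p.2 value then (p.1 ++ [value], PySem.Set.add p.2 value) else p)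
      (s, s)
    = (ys.foldl PySem.Set.add s, ys.foldl PySem.Set.add s) := by
  induction ys generalizing s with
  | nil => rfl
  | cons v t ih =>
      simp only [List.foldl_cons]
      by_cases h : v ∈ s
      · simpa [PySem.Set.add, h] using ih s
      · simpa [PySem.Set.add, h] using ih (s ++ [v])

-- B's append loop in recursive form
theorem pvB_fold_go (l : List Int) (acc : List Int) :
    l.foldl (fun out v => if out = [] ∨ out.getLast? ≠ some v then out ++ [v] else out) acc
      = acc ++ pvGo acc.getLast? l := by
  induction l generalizing acc with
  | nil => simp [pvGo_nil]
  | cons v t ih =>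
      rw [List.foldl_cons]
      by_cases h : acc.getLast? = some v
      · have hne : acc ≠ [] := by intro hn; simp [hn] at h
        rw [if_neg (by push Not; exact ⟨hne, h⟩), ih, pvGo_cons_eq _ _ _ h]
      · rw [if_pos (Or.inr h), ih, pvGo_cons_ne _ _ _ h]
        have : (acc ++ [v]).getLast? = some v := by simp
        rw [this]
        simp

theorem pvGo_spec (s : List Int) (hs : s.Pairwise (· ≤ ·)) :
    ∀ a, (∀ b ∈ s, a ≤ b) →
      (pvGo (some a) s).Pairwise (· < ·) ∧ (∀ x ∈ pvGo (some a) s, a < x) ∧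
      (∀ x, x ∈ pvGo (some a) s ↔ x ∈ s ∧ x ≠ a) := by
  induction s with
  | nil => intro a _; simp [pvGo_nil]
  | cons v t ih =>
      intro a ha
      have hv : a ≤ v := ha v (by simp)
      have hvt : ∀ b ∈ t, v ≤ b := fun b hb => (List.pairwise_cons.mp hs).1 b hb
      have ht : t.Pairwise (· ≤ ·) := (List.pairwise_cons.mp hs).2
      by_cases hav : a = v
      · subst hav
        have iha := ih ht a hvt
        rw [pvGo_cons_eq _ _ _ rfl]
        refine ⟨iha.1, iha.2.1, ?_⟩
        intro x
        rw [iha.2.2 x, List.mem_cons]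
        constructor
        · rintro ⟨hx, hxa⟩; exact ⟨Or.inr hx, hxa⟩
        · rintro ⟨hx | hx, hxa⟩
          · exact absurd hx hxa
          · exact ⟨hx, hxa⟩
      · have halt : a < v := lt_of_le_of_ne hv hav
        have ihv := ih ht v hvt
        rw [pvGo_cons_ne _ _ _ (by simpa using hav)]
        refine ⟨?_, ?_, ?_⟩
        · rw [List.pairwise_cons]
          refine ⟨fun x hx => ?_, ihv.1⟩
          have hm := (ihv.2.2 x).mp hx
          exact lt_of_le_of_ne (hvt x hm.1) (Ne.symm hm.2)
        · intro x hx
          rcases List.mem_cons.mp hx with rfl | hx'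
          · exact halt
          · exact halt.trans (ihv.2.1 x hx')
        · intro x
          rw [List.mem_cons, List.mem_cons, ihv.2.2 x]
          constructor
          · rintro (rfl | ⟨hx, _⟩)
            · exact ⟨Or.inl rfl, Ne.symm hav⟩
            · refine ⟨Or.inr hx, fun h => ?_⟩
              subst h
              exact absurd (hvt x hx) (not_le.mpr halt)
          · rintro ⟨hx | hx, hxa⟩
            · exact Or.inl hx
            · by_cases hxv : x = v
              · exact Or.inl hxv
              · exact Or.inr ⟨hx, hxv⟩

theorem pvGo_none_spec (s : List Int) (hs : s.Pairwise (· ≤ ·)) :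
    (pvGo none s).Pairwise (· < ·) ∧ (∀ x, x ∈ pvGo none s ↔ x ∈ s) := by
  cases s with
  | nil => simp [pvGo_nil]
  | cons v t =>
      have hvt : ∀ b ∈ t, v ≤ b := fun b hb => (List.pairwise_cons.mp hs).1 b hb
      have ht : t.Pairwise (· ≤ ·) := (List.pairwise_cons.mp hs).2
      have h := pvGo_spec t ht v hvt
      rw [pvGo_cons_ne _ _ _ (by simp)]
      constructor
      · rw [List.pairwise_cons]
        refine ⟨fun x hx => ?_, h.1⟩
        have hm := (h.2.2 x).mp hx
        exact lt_of_le_of_ne (hvt x hm.1) (Ne.symm hm.2)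
      · intro x
        rw [List.mem_cons, List.mem_cons, h.2.2 x]
        constructor
        · rintro (rfl | ⟨hx, _⟩)
          · exact Or.inl rfl
          · exact Or.inr hx
        · rintro (rfl | hx)
          · exact Or.inl rfl
          · by_cases hxv : x = v
            · exact Or.inl hxv
            · exact Or.inr ⟨hx, hxv⟩

-- ===== VERDICT (by name: the statement is the Claim_ definition above) =====
theorem coerce_year_list_py_spec : Claim_equal_coerce_year_list_py := by
  intro years _
  unfold Spec_coerce_year_list_py coerce_year_list_py coerce_year_list_py_alt
  cases years with
  | none => rfl
  | some ys =>
      simp only []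
      rw [show (([], PySem.Set.empty) : List Int × PySem.Set Int) = (([] : List Int), ([] : List Int)) from rfl,
          pvA_fold_pair, pvB_fold_go]
      have hofl : ys.foldl PySem.Set.add [] = PySem.List.dedup ys := by
        rw [PySem.List.dedup_eq_ofList, PySem.Set.ofList_eq_foldl]
      rw [hofl]
      simp only [List.nil_append, List.getLast?_nil]
      -- both sides: sorted, duplicate-free lists with the same members
      have hsorted := PySem.List.sorted_pairwise ys (fun x => x) (κ := Int)
      have hgo := pvGo_none_spec (PySem.List.sorted ys (fun x => x) false) hsorted
      have hperm : (pvGo none (PySem.List.sorted ys (fun x => x) false)).Perm (PySem.List.dedup ys) := by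
        rw [List.perm_ext_iff_of_nodup (hgo.1.imp (fun h => ne_of_lt h)) (PySem.List.nodup_dedup ys)]
        intro x
        rw [hgo.2 x, PySem.List.mem_sorted, PySem.List.mem_dedup]
      exact PySem.List.sorted_eq_of_perm_of_pairwise_lt _ _ _ hperm hgo.1
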